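-- pv_equiv track=rewrite | github.com/Zeeeepa/agent | jinx/micro/memory/storage.py | _parse_channels
-- ===== SOURCE A (Python) =====
-- def _parse_channels(durable_text: str) -> dict[str, list[str]]:
--     buckets: dict[str, list[str]] = {
--         "paths": [],
--         "symbols": [],
--         "prefs": [],
--         "decisions": [],
--     }
--     for raw in (durable_text or "").splitlines():
--         line = (raw or "").strip()
--         if not line:
--             continue
--         low = line.lower()
--         if low.startswith("path: "):
--             buckets["paths"].append(line)
--         elif low.startswith("symbol: "):
--             buckets["symbols"].append(line)
--         elif low.startswith("pref: "):
--             buckets["prefs"].append(line)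
--         elif low.startswith("decision: "):
--             buckets["decisions"].append(line)
--     return buckets
-- ===== SOURCE B (Python) =====
-- def _parse_channels(durable_text: str) -> dict[str, list[str]]:
--     lines = [ln for ln in (s.strip() for s in (durable_text or "").splitlines()) if ln]
--     return {
--         bucket: [ln for ln in lines if ln.lower().startswith(prefix + ": ")]
--         for bucket, prefix in (
--             ("paths", "path"),
--             ("symbols", "symbol"),
--             ("prefs", "pref"),
--             ("decisions", "decision"),
--         )
--     }
-- ===== Notes on version B (the rewrite author's own statement) =====
-- stated objective: idiomatic
-- what changed: Replaces the single pass with an if/elif chain mutating four dict buckets by a pre-cleaned line list and one independent filter comprehension per bucket (correct because the four prefixes are mutually exclusive).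
import Mathlib
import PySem

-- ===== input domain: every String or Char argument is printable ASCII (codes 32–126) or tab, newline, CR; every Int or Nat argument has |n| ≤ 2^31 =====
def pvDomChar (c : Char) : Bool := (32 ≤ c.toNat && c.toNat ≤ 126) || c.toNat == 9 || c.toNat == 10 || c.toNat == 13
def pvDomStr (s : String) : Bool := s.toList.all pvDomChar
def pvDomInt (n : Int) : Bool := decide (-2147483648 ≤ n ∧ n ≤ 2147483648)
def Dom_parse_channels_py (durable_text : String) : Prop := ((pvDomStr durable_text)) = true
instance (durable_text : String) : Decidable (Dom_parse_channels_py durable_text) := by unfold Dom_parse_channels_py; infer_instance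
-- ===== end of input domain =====

-- B replaces A's single pass mutating four dict buckets through an if/elif chain by one
-- independent filter per bucket over the pre-cleaned line list (idiomatic; same cost).

-- ===== PORT A =====
def pvStepA (buckets : PySem.Dict String (List String)) (raw : String) :
    PySem.Dict String (List String) :=
  let line := PySem.Str.strip (if raw = "" then "" else raw)
  if line = "" then buckets
  else
    let low := PySem.Str.lower line
    if PySem.Str.startswith low "path: " then
      PySem.Dict.modify buckets "paths" [] (· ++ [line])
    else if PySem.Str.startswith low "symbol: " then
      PySem.Dict.modify buckets "symbols" [] (· ++ [line])
    else if PySem.Str.startswith low "pref: " then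
      PySem.Dict.modify buckets "prefs" [] (· ++ [line])
    else if PySem.Str.startswith low "decision: " then
      PySem.Dict.modify buckets "decisions" [] (· ++ [line])
    else buckets

def parse_channels_py (durable_text : String) : List (String × List String) :=
  let init : PySem.Dict String (List String) :=
    PySem.Dict.mk [("paths", []), ("symbols", []), ("prefs", []), ("decisions", [])]
  ((PySem.Str.splitlines (if durable_text = "" then "" else durable_text)).foldl
    pvStepA init).items

-- ===== PORT B =====
def pvKeep (pre : String) (ln : String) : Bool :=
  PySem.Str.startswith (PySem.Str.lower ln) (pre ++ ": ")

def parse_channels_py_alt (durable_text : String) : List (String × List String) :=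
  let lines :=
    ((PySem.Str.splitlines (if durable_text = "" then "" else durable_text)).map
      PySem.Str.strip).filter (fun ln => !(ln == ""))
  [("paths", lines.filter (pvKeep "path")),
   ("symbols", lines.filter (pvKeep "symbol")),
   ("prefs", lines.filter (pvKeep "pref")),
   ("decisions", lines.filter (pvKeep "decision"))]

-- ===== PRECONDITION & SPEC =====
def Spec_parse_channels_py (durable_text : String) (out : List (String × List String)) : Prop := out = parse_channels_py_alt durable_text
instance (durable_text : String) (out : List (String × List String)) : Decidable (Spec_parse_channels_py durable_text out) := by unfold Spec_parse_channels_py; infer_instance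

-- ===== CLAIM (what is proved, stated in full; the proofs are below) =====
def Claim_equal_parse_channels_py : Prop := ∀ (durable_text : String), Dom_parse_channels_py durable_text → Spec_parse_channels_py durable_text (parse_channels_py durable_text)

-- ===== LEMMAS AND PROOFS =====

-- two prefixes of the same list are comparable
theorem pv_pref_total {α : Type} (l p q : List α) (hp : p <+: l) (hq : q <+: l) :
    p <+: q ∨ q <+: p := by
  induction l generalizing p q with
  | nil => left; simp_all
  | cons x xs ih =>
    cases p with
    | nil => left; exact List.nil_prefix
    | cons a p' =>
      cases q with
      | nil => right; exact List.nil_prefix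
      | cons b q' =>
        obtain ⟨hax, hp'⟩ := List.cons_prefix_cons.mp hp
        obtain ⟨hbx, hq'⟩ := List.cons_prefix_cons.mp hq
        rcases ih p' q' hp' hq' with h | h
        · left; exact List.cons_prefix_cons.mpr ⟨hax.trans hbx.symm, h⟩
        · right; exact List.cons_prefix_cons.mpr ⟨hbx.trans hax.symm, h⟩

-- two non-comparable prefixes cannot both start the same string
theorem pv_excl {l p q : List Char} (hp : PySem.Chars.startswith l p = true)
    (h1 : ¬ p <+: q) (h2 : ¬ q <+: p) : PySem.Chars.startswith l q = false := by
  by_contra h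
  have hq : PySem.Chars.startswith l q = true := by
    cases hval : PySem.Chars.startswith l q with
    | true => rfl
    | false => exact absurd hval h
  rw [PySem.Chars.startswith_iff] at hp hq
  rcases pv_pref_total l p q hp hq with h' | h'
  · exact h1 h'
  · exact h2 h'

theorem pv_keep_excl (ln : String) {p q : String}
    (hp : pvKeep p ln = true)
    (h1 : ¬ (p ++ ": ").toList <+: (q ++ ": ").toList)
    (h2 : ¬ (q ++ ": ").toList <+: (p ++ ": ").toList) :
    pvKeep q ln = false := by
  unfold pvKeep at hp ⊢
  simp only [PySem.Str.startswith_eq] at hp ⊢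
  exact pv_excl hp h1 h2

-- the fold invariant: A's loop over any line list, from any four-bucket state
theorem pv_invariant (lines : List String) (p s pr d : List String) :
    (lines.foldl pvStepA
      (PySem.Dict.mk [("paths", p), ("symbols", s), ("prefs", pr), ("decisions", d)])).items
    = [("paths", p ++ ((lines.map PySem.Str.strip).filter (fun ln => !(ln == ""))).filter (pvKeep "path")),
       ("symbols", s ++ ((lines.map PySem.Str.strip).filter (fun ln => !(ln == ""))).filter (pvKeep "symbol")),
       ("prefs", pr ++ ((lines.map PySem.Str.strip).filter (fun ln => !(ln == ""))).filter (pvKeep "pref")),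
       ("decisions", d ++ ((lines.map PySem.Str.strip).filter (fun ln => !(ln == ""))).filter (pvKeep "decision"))] := by
  induction lines generalizing p s pr d with
  | nil => simp
  | cons raw rest ih =>
    simp only [List.foldl_cons, List.map_cons, List.filter_cons]
    have hraw : PySem.Str.strip (if raw = "" then "" else raw) = PySem.Str.strip raw := by
      split <;> simp_all
    by_cases hemp : PySem.Str.strip raw = ""
    · have hstep : pvStepA (PySem.Dict.mk [("paths", p), ("symbols", s), ("prefs", pr), ("decisions", d)]) raw
          = PySem.Dict.mk [("paths", p), ("symbols", s), ("prefs", pr), ("decisions", d)] := by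
        simp only [pvStepA, hraw]; simp [hemp]
      rw [hstep, ih]
      simp [hemp]
    · have hfilt : (!(PySem.Str.strip raw == "")) = true := by simp [hemp]
      rw [hfilt]
      by_cases h1 : pvKeep "path" (PySem.Str.strip raw) = true
      · have e2 := pv_keep_excl _ h1 (p := "path") (q := "symbol") (by decide) (by decide)
        have e3 := pv_keep_excl _ h1 (p := "path") (q := "pref") (by decide) (by decide)
        have e4 := pv_keep_excl _ h1 (p := "path") (q := "decision") (by decide) (by decide)
        have hstep : pvStepA (PySem.Dict.mk [("paths", p), ("symbols", s), ("prefs", pr), ("decisions", d)]) raw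
            = PySem.Dict.mk [("paths", p ++ [PySem.Str.strip raw]), ("symbols", s), ("prefs", pr), ("decisions", d)] := by
          have hc1 : PySem.Str.startswith (PySem.Str.lower (PySem.Str.strip raw)) "path: " = true := h1
          simp at hc1
          simp only [pvStepA, hraw]
          simp [hemp, hc1, PySem.Dict.modify, PySem.Dict.insert, PySem.Dict.getD,
            PySem.Dict.get?, PySem.Dict.contains]
        rw [hstep, ih]
        simp [h1, e2, e3, e4]
      · have h1' : pvKeep "path" (PySem.Str.strip raw) = false := by simpa using h1
        have hc1 : PySem.Str.startswith (PySem.Str.lower (PySem.Str.strip raw)) "path: " = false := h1'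
        by_cases h2 : pvKeep "symbol" (PySem.Str.strip raw) = true
        · have e3 := pv_keep_excl _ h2 (p := "symbol") (q := "pref") (by decide) (by decide)
          have e4 := pv_keep_excl _ h2 (p := "symbol") (q := "decision") (by decide) (by decide)
          have hstep : pvStepA (PySem.Dict.mk [("paths", p), ("symbols", s), ("prefs", pr), ("decisions", d)]) raw
              = PySem.Dict.mk [("paths", p), ("symbols", s ++ [PySem.Str.strip raw]), ("prefs", pr), ("decisions", d)] := by
            have hc2 : PySem.Str.startswith (PySem.Str.lower (PySem.Str.strip raw)) "symbol: " = true := h2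
            simp at hc1 hc2
            simp only [pvStepA, hraw]
            simp [hemp, hc1, hc2, PySem.Dict.modify, PySem.Dict.insert, PySem.Dict.getD,
              PySem.Dict.get?, PySem.Dict.contains]
          rw [hstep, ih]
          simp [h1', h2, e3, e4]
        · have h2' : pvKeep "symbol" (PySem.Str.strip raw) = false := by simpa using h2
          have hc2 : PySem.Str.startswith (PySem.Str.lower (PySem.Str.strip raw)) "symbol: " = false := h2'
          by_cases h3 : pvKeep "pref" (PySem.Str.strip raw) = true
          · have e4 := pv_keep_excl _ h3 (p := "pref") (q := "decision") (by decide) (by decide)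
            have hstep : pvStepA (PySem.Dict.mk [("paths", p), ("symbols", s), ("prefs", pr), ("decisions", d)]) raw
                = PySem.Dict.mk [("paths", p), ("symbols", s), ("prefs", pr ++ [PySem.Str.strip raw]), ("decisions", d)] := by
              have hc3 : PySem.Str.startswith (PySem.Str.lower (PySem.Str.strip raw)) "pref: " = true := h3
              simp at hc1 hc2 hc3
              simp only [pvStepA, hraw]
              simp [hemp, hc1, hc2, hc3, PySem.Dict.modify, PySem.Dict.insert, PySem.Dict.getD,
                PySem.Dict.get?, PySem.Dict.contains]
            rw [hstep, ih]
            simp [h1', h2', h3, e4]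
          · have h3' : pvKeep "pref" (PySem.Str.strip raw) = false := by simpa using h3
            have hc3 : PySem.Str.startswith (PySem.Str.lower (PySem.Str.strip raw)) "pref: " = false := h3'
            by_cases h4 : pvKeep "decision" (PySem.Str.strip raw) = true
            · have hstep : pvStepA (PySem.Dict.mk [("paths", p), ("symbols", s), ("prefs", pr), ("decisions", d)]) raw
                  = PySem.Dict.mk [("paths", p), ("symbols", s), ("prefs", pr), ("decisions", d ++ [PySem.Str.strip raw])] := by
                have hc4 : PySem.Str.startswith (PySem.Str.lower (PySem.Str.strip raw)) "decision: " = true := h4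
                simp at hc1 hc2 hc3 hc4
                simp only [pvStepA, hraw]
                simp [hemp, hc1, hc2, hc3, hc4, PySem.Dict.modify, PySem.Dict.insert,
                  PySem.Dict.getD, PySem.Dict.get?, PySem.Dict.contains]
              rw [hstep, ih]
              simp [h1', h2', h3', h4]
            · have h4' : pvKeep "decision" (PySem.Str.strip raw) = false := by simpa using h4
              have hc4 : PySem.Str.startswith (PySem.Str.lower (PySem.Str.strip raw)) "decision: " = false := h4'
              have hstep : pvStepA (PySem.Dict.mk [("paths", p), ("symbols", s), ("prefs", pr), ("decisions", d)]) raw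
                  = PySem.Dict.mk [("paths", p), ("symbols", s), ("prefs", pr), ("decisions", d)] := by
                simp at hc1 hc2 hc3 hc4
                simp only [pvStepA, hraw]
                simp [hemp, hc1, hc2, hc3, hc4]
              rw [hstep, ih]
              simp [h1', h2', h3', h4']

-- ===== VERDICT (by name: the statement is the Claim_ definition above) =====
theorem parse_channels_py_spec : Claim_equal_parse_channels_py := by
  intro durable_text _
  unfold Spec_parse_channels_py parse_channels_py parse_channels_py_alt
  exact pv_invariant _ [] [] [] []
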